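-- pv_equiv track=rewrite | github.com/alesoumac/flask-tests | VisualCheck/config.py | namefy
-- ===== SOURCE A (Python) =====
-- def namefy(nome):
--     if ' ' not in nome:
--         n = nome.lower()
--         if n in ['de','da','do','das','dos','e']: return n
--         p = n.split('\'')
--         n = '\''.join([m.capitalize() for m in p])
--         return n
--     p = nome.split(' ')
--     p = [namefy(n) for n in p if n != '']
--     n = ' '.join(p)
--     return n
-- ===== SOURCE B (Python) =====
-- # Single pass over the characters: accumulate the current lowered word, flush at
-- # each space (connectives kept, otherwise uppercase at word start and after "'").
-- CONNECTIVES = ('de', 'da', 'do', 'das', 'dos', 'e')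
--
-- def namefy(nome):
--     out = []
--     word = []
--     for c in nome + ' ':
--         if c == ' ':
--             if word:
--                 w = ''.join(word)
--                 if w not in CONNECTIVES:
--                     w2 = []
--                     prev = "'"
--                     for ch in w:
--                         w2.append(ch.upper() if prev == "'" else ch)
--                         prev = ch
--                     w = ''.join(w2)
--                 if out:
--                     out.append(' ')
--                 out.append(w)
--             word = []
--         else:
--             word.append(c.lower())
--     return ''.join(out)
-- ===== Notes on version B (the rewrite author's own statement) =====
-- stated objective: alternative
-- what changed: Replaces A's self-recursion over split(' ') and the inner split("'")/capitalize/join passes by a single left-to-right scan of the characters that accumulates the current lowered word and flushes it at each space, uppercasing exactly at word start and after an apostrophe.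
import Mathlib
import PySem

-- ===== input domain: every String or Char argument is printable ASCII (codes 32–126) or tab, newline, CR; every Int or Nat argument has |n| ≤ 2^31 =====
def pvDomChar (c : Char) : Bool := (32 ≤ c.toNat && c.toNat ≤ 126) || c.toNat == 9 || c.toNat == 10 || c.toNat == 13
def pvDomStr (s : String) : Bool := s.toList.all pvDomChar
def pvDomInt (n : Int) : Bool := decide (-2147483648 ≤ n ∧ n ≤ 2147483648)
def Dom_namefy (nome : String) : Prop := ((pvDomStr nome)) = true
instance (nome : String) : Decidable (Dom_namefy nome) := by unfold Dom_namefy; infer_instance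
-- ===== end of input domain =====

-- B replaces A's recursion over split(' ')/split("'") by a single left-to-right scan of the
-- characters (objective: alternative decomposition, same cost); return values proved equal.

-- ===== PORT A =====
-- the connective list ['de','da','do','das','dos','e'] as lists of chars
def pvConn : List (List Char) :=
  [['d','e'], ['d','a'], ['d','o'], ['d','a','s'], ['d','o','s'], ['e']]

-- Python str.capitalize (exact on the ASCII domain): first char uppercased, rest lowered
def pvCapitalize (w : List Char) : List Char :=
  match w with
  | [] => []
  | c :: cs => PySem.Chars.upperChar c :: PySem.Chars.lower cs

-- A's self-recursion, made total by a fuel counter (a totality guard only: the recursive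
-- calls act on pieces of split(' '), which contain no space and return in the base branch,
-- so the recursion depth is at most 2 and fuel 2 reproduces A everywhere).
-- `' ' ∈ cs` ports Python's `' ' in nome` (one-character substring test = membership, exact).
def namefyAux : Nat → List Char → List Char
  | 0, _ => []
  | fuel + 1, cs =>
    if ' ' ∉ cs then
      let n := PySem.Chars.lower cs
      if n ∈ pvConn then n
      else PySem.Chars.join ['\''] ((PySem.Chars.splitOn n ['\'']).map pvCapitalize)
    else
      PySem.Chars.join [' ']
        (((PySem.Chars.splitOn cs [' ']).filter (fun w => w ≠ [])).map (namefyAux fuel))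

def namefy (nome : String) : String := String.mk (namefyAux 2 nome.toList)

-- ===== PORT B =====
-- inner loop of Source B: prev starts at '\'', uppercase a char exactly when prev is '\''
def pvCapScan : Char → List Char → List Char
  | _, [] => []
  | prev, c :: cs => (if prev = '\'' then PySem.Chars.upperChar c else c) :: pvCapScan c cs

-- flushing one accumulated (already lowered) word: connectives pass through unchanged
def pvFlush (w : List Char) : List Char :=
  if w ∈ pvConn then w else pvCapScan '\'' w

-- one step of Source B's for-loop; state = (out, word); out is kept as the flat
-- concatenation of the pieces Source B appends (''.join(out) at the end — exact)
def pvStep (st : List Char × List Char) (c : Char) : List Char × List Char :=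
  if c = ' ' then
    if st.2 ≠ [] then
      ((if st.1 ≠ [] then st.1 ++ [' '] else st.1) ++ pvFlush st.2, [])
    else (st.1, [])
  else (st.1, st.2 ++ [PySem.Chars.lowerChar c])

def namefy_alt (nome : String) : String :=
  String.mk ((nome.toList ++ [' ']).foldl pvStep ([], [])).1

-- ===== PRECONDITION & SPEC =====
def Spec_namefy (nome : String) (out : String) : Prop := out = namefy_alt nome
instance (nome : String) (out : String) : Decidable (Spec_namefy nome out) := by unfold Spec_namefy; infer_instance

-- ===== CLAIM (what is proved, stated in full; the proofs are below) =====
def Claim_equal_namefy : Prop := ∀ (nome : String), Dom_namefy nome → Spec_namefy nome (namefy nome)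

-- ===== LEMMAS AND PROOFS =====

-- ASCII case-mapping facts
lemma isupper_bounds {c : Char} (h : PySem.Chars.isupper c = true) : 65 ≤ c.toNat ∧ c.toNat ≤ 90 := by
  unfold PySem.Chars.isupper at h
  simp [Char.le_def] at h
  exact h

lemma toNat_lowerChar {c : Char} (h : PySem.Chars.isupper c = true) :
    (PySem.Chars.lowerChar c).toNat = c.toNat + 32 := by
  obtain ⟨h1, h2⟩ := isupper_bounds h
  unfold PySem.Chars.lowerChar
  rw [if_pos h, Char.toNat_ofNat, if_pos]
  exact Or.inl (by omega)

lemma lowerChar_eq_of_not_upper {c : Char} (h : PySem.Chars.isupper c = false) :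
    PySem.Chars.lowerChar c = c := by
  unfold PySem.Chars.lowerChar
  simp [h]

lemma lowerChar_ne_space {c : Char} (h : c ≠ ' ') : PySem.Chars.lowerChar c ≠ ' ' := by
  by_cases hu : PySem.Chars.isupper c = true
  · intro hcon
    have ht := toNat_lowerChar hu
    rw [hcon] at ht
    have h1 := (isupper_bounds hu).1
    have h32 : (32 : Nat) = c.toNat + 32 := ht
    omega
  · rw [lowerChar_eq_of_not_upper (by simpa using hu)]; exact h

lemma isupper_lowerChar (c : Char) : PySem.Chars.isupper (PySem.Chars.lowerChar c) = false := by
  by_cases hu : PySem.Chars.isupper c = true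
  · have ht := toNat_lowerChar hu
    obtain ⟨h1, h2⟩ := isupper_bounds hu
    rw [Bool.eq_false_iff]
    intro hcon
    have := isupper_bounds hcon
    rw [ht] at this
    omega
  · rw [lowerChar_eq_of_not_upper (by simpa using hu)]
    simpa using hu

-- reference splitter: Python's s.split(sep) for a one-character sep
def mySplit : List Char → Char → List (List Char)
  | [], _ => [[]]
  | c :: rest, a => if c = a then [] :: mySplit rest a else (mySplit rest a).modifyHead (c :: ·)

lemma mySplit_ne_nil (l : List Char) (a : Char) : mySplit l a ≠ [] := by
  induction l with
  | nil => simp [mySplit]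
  | cons c rest ih =>
    by_cases h : c = a
    · simp [mySplit, h]
    · simp only [mySplit, if_neg h]
      cases hms : mySplit rest a with
      | nil => exact absurd hms ih
      | cons x y => simp

lemma mySplit_cons_exists (l : List Char) (a : Char) :
    ∃ h t, mySplit l a = h :: t := by
  cases hms : mySplit l a with
  | nil => exact absurd hms (mySplit_ne_nil l a)
  | cons x y => exact ⟨x, y, rfl⟩

lemma go_spec (a : Char) : ∀ (fuel : Nat) (l cur : List Char) (acc : List (List Char)),
    l.length < fuel →
    PySem.Chars.splitOn.go [a] fuel l cur acc
      = acc.reverse ++ (mySplit l a).modifyHead (cur.reverse ++ ·) := by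
  intro fuel
  induction fuel with
  | zero => intro l cur acc h; omega
  | succ f ih =>
    intro l cur acc h
    cases l with
    | nil => simp [PySem.Chars.splitOn.go, mySplit]
    | cons c rest =>
      by_cases hc : c = a
      · subst hc
        have hpre : List.isPrefixOf [c] (c :: rest) = true := by
          simp [List.isPrefixOf]
        rw [show PySem.Chars.splitOn.go [c] (f+1) (c :: rest) cur acc
              = PySem.Chars.splitOn.go [c] f (List.drop 1 (c :: rest)) [] (cur.reverse :: acc) from by
            rw [PySem.Chars.splitOn.go]; simp [hpre]]
        rw [ih _ _ _ (by simpa using Nat.lt_of_succ_lt_succ h)]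
        obtain ⟨h', t', ht⟩ := mySplit_cons_exists rest c
        simp [mySplit, ht]
      · have hpre : List.isPrefixOf [a] (c :: rest) = false := by
          simp [List.isPrefixOf]
          intro hh; exact absurd hh.symm hc
        rw [show PySem.Chars.splitOn.go [a] (f+1) (c :: rest) cur acc
              = PySem.Chars.splitOn.go [a] f rest (c :: cur) acc from by
            rw [PySem.Chars.splitOn.go]; simp [hpre]]
        rw [ih _ _ _ (by simpa using Nat.lt_of_succ_lt_succ h)]
        obtain ⟨h', t', ht⟩ := mySplit_cons_exists rest a
        simp [mySplit, hc, ht]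

lemma splitOn_eq_mySplit (l : List Char) (a : Char) :
    PySem.Chars.splitOn l [a] = mySplit l a := by
  have := go_spec a (l.length + 1) l [] [] (by omega)
  obtain ⟨h', t', ht⟩ := mySplit_cons_exists l a
  simpa [PySem.Chars.splitOn, ht] using this

lemma not_mem_of_mem_mySplit {l : List Char} {a : Char} {p : List Char}
    (hp : p ∈ mySplit l a) : a ∉ p := by
  induction l generalizing p with
  | nil => simp [mySplit] at hp; simp [hp]
  | cons c rest ih =>
    by_cases hc : c = a
    · simp [mySplit, hc] at hp
      rcases hp with h | h
      · simp [h]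
      · exact ih h
    · simp only [mySplit, if_neg hc] at hp
      obtain ⟨h', t', ht⟩ := mySplit_cons_exists rest a
      rw [ht] at hp
      simp at hp
      rcases hp with h | h
      · subst h
        have : a ∉ h' := ih (by rw [ht]; simp)
        simp only [List.mem_cons, not_or, this, not_false_iff, and_true]
        exact fun x => hc x.symm
      · exact ih (by rw [ht]; simp [h])

lemma mem_of_mem_mySplit {l : List Char} {a : Char} {p : List Char} {x : Char}
    (hp : p ∈ mySplit l a) (hx : x ∈ p) : x ∈ l := by
  induction l generalizing p with
  | nil => simp [mySplit] at hp; subst hp; simp at hx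
  | cons c rest ih =>
    by_cases hc : c = a
    · simp [mySplit, hc] at hp
      rcases hp with h | h
      · subst h; simp at hx
      · exact List.mem_cons_of_mem _ (ih h hx)
    · simp only [mySplit, if_neg hc] at hp
      obtain ⟨h', t', ht⟩ := mySplit_cons_exists rest a
      rw [ht] at hp
      simp at hp
      rcases hp with h | h
      · subst h
        rcases List.mem_cons.mp hx with h | h
        · simp [h]
        · exact List.mem_cons_of_mem _ (ih (by rw [ht]; simp) h)
      · exact List.mem_cons_of_mem _ (ih (by rw [ht]; simp [h]) hx)

lemma mySplit_append {w : List Char} {a : Char} (l : List Char) (h : a ∉ w) :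
    mySplit (w ++ l) a = (mySplit l a).modifyHead (w ++ ·) := by
  induction w with
  | nil =>
    obtain ⟨h', t', ht⟩ := mySplit_cons_exists l a
    simp [ht]
  | cons c w' ih =>
    have hc : c ≠ a := by intro hh; exact h (by simp [hh])
    have h' : a ∉ w' := fun hh => h (by simp [hh])
    simp only [List.cons_append, mySplit, if_neg hc, ih h']
    obtain ⟨x, y, ht⟩ := mySplit_cons_exists l a
    simp [ht]

lemma mySplit_no_sep {w : List Char} {a : Char} (h : a ∉ w) : mySplit w a = [w] := by
  have := mySplit_append (w := w) (a := a) [] h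
  simpa [mySplit] using this

lemma mySplit_lower (l : List Char) :
    mySplit (PySem.Chars.lower l) ' ' = (mySplit l ' ').map PySem.Chars.lower := by
  induction l with
  | nil => simp [mySplit, PySem.Chars.lower]
  | cons c rest ih =>
    by_cases hc : c = ' '
    · subst hc
      have : PySem.Chars.lowerChar ' ' = ' ' := by decide
      simp [PySem.Chars.lower, mySplit, this, ← ih]
    · have hne : PySem.Chars.lowerChar c ≠ ' ' := lowerChar_ne_space hc
      obtain ⟨h', t', ht⟩ := mySplit_cons_exists rest ' '
      have hlow : PySem.Chars.lower (c :: rest) = PySem.Chars.lowerChar c :: PySem.Chars.lower rest := by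
        simp [PySem.Chars.lower]
      rw [hlow]
      simp only [mySplit, if_neg hc, if_neg hne, ih, ht]
      simp [PySem.Chars.lower]

-- capitalize with the tail left as-is (the tail is already lowered where we use it)
def capHead : List Char → List Char
  | [] => []
  | c :: cs => PySem.Chars.upperChar c :: cs

-- reference value of Source B's inner loop: head part as capitalized (or not), later
-- parts each prefixed by the apostrophe and capitalized
def joinCap (b : Bool) (parts : List (List Char)) : List Char :=
  match parts with
  | [] => []
  | h :: t => (if b then capHead h else h) ++ (t.map (fun p => '\'' :: capHead p)).flatten

lemma capScan_eq_joinCap (w : List Char) : ∀ (prev : Char),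
    pvCapScan prev w = joinCap (prev = '\'') (mySplit w '\'') := by
  induction w with
  | nil => intro prev; by_cases h : prev = '\'' <;> simp [pvCapScan, mySplit, joinCap, h, capHead]
  | cons c cs ih =>
    intro prev
    by_cases hc : c = '\''
    · subst hc
      have hup : PySem.Chars.upperChar '\'' = '\'' := by decide
      obtain ⟨h', t', ht⟩ := mySplit_cons_exists cs '\''
      simp only [pvCapScan, mySplit, ih '\'', ht, joinCap]
      by_cases hp : prev = '\'' <;> simp [hp, hup, capHead]
    · obtain ⟨h', t', ht⟩ := mySplit_cons_exists cs '\''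
      simp only [pvCapScan, mySplit, if_neg hc, ih c, ht, joinCap]
      by_cases hp : prev = '\'' <;> simp [hp, hc, capHead]

lemma capScan_length (w : List Char) : ∀ prev, (pvCapScan prev w).length = w.length := by
  induction w with
  | nil => intro prev; simp [pvCapScan]
  | cons c cs ih => intro prev; simp [pvCapScan, ih c]

lemma pvFlush_ne_nil {w : List Char} (h : w ≠ []) : pvFlush w ≠ [] := by
  unfold pvFlush
  split
  · exact h
  · intro hcon
    have := capScan_length w '\''
    rw [hcon] at this
    simp at this
    exact h (List.length_eq_zero_iff.mp this.symm)

lemma join_cons_flatten (q : Char) : ∀ (t : List (List Char)) (h : List Char),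
    PySem.Chars.join [q] (h :: t) = h ++ (t.map (fun p => q :: p)).flatten := by
  intro t
  induction t with
  | nil => intro h; simp [PySem.Chars.join, List.intercalate]
  | cons x t' ih =>
    intro h
    rw [PySem.Chars.join_cons_cons, ih x]
    simp

-- on a fully lowered word, Python's capitalize is capHead on every split piece
lemma map_capitalize_eq_capHead {n : List Char}
    (hlow : ∀ x ∈ n, PySem.Chars.isupper x = false) :
    (mySplit n '\'').map pvCapitalize = (mySplit n '\'').map capHead := by
  apply List.map_congr_left
  intro p hp
  cases p with
  | nil => rfl
  | cons c cs =>
    have : PySem.Chars.lower cs = cs := by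
      have hall : ∀ x ∈ cs, PySem.Chars.lowerChar x = x := fun x hx =>
        lowerChar_eq_of_not_upper (hlow x (mem_of_mem_mySplit hp (List.mem_cons_of_mem _ hx)))
      calc (PySem.Chars.lower cs) = cs.map (fun x => x) := List.map_congr_left hall
        _ = cs := List.map_id' cs
    simp [pvCapitalize, capHead, this]

-- the base (no-space) branch of A equals B's word flush on the lowered word
lemma namefyAux_word {w : List Char} (f : Nat) (h : ' ' ∉ w) :
    namefyAux (f + 1) w = pvFlush (PySem.Chars.lower w) := by
  have hlow : ∀ x ∈ PySem.Chars.lower w, PySem.Chars.isupper x = false := by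
    intro x hx
    simp [PySem.Chars.lower] at hx
    obtain ⟨y, _, hy⟩ := hx
    rw [← hy]; exact isupper_lowerChar y
  simp only [namefyAux, if_pos h, pvFlush]
  by_cases hconn : PySem.Chars.lower w ∈ pvConn
  · simp [hconn]
  · rw [if_neg hconn, if_neg hconn]
    rw [splitOn_eq_mySplit, map_capitalize_eq_capHead hlow,
        capScan_eq_joinCap (PySem.Chars.lower w) '\'']
    obtain ⟨h', t', ht⟩ := mySplit_cons_exists (PySem.Chars.lower w) '\''
    rw [ht]
    simp only [List.map_cons, join_cons_flatten, joinCap]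
    simp [List.map_map, Function.comp_def]

-- proof-side accumulator: what Source B's outer loop does to the flushed words
def J : List Char → List (List Char) → List Char
  | out, [] => out
  | out, w :: ws => J ((if out ≠ [] then out ++ [' '] else out) ++ pvFlush w) ws

lemma J_join : ∀ (ws : List (List Char)) (out : List Char), (∀ w ∈ ws, w ≠ []) →
    J out ws = if ws = [] then out
      else (if out ≠ [] then out ++ [' '] else out) ++ PySem.Chars.join [' '] (ws.map pvFlush) := by
  intro ws
  induction ws with
  | nil => intro out _; simp [J]
  | cons w ws' ih =>
    intro out hne
    have hw : w ≠ [] := hne w (by simp)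
    have hfw : pvFlush w ≠ [] := pvFlush_ne_nil hw
    cases ws' with
    | nil => simp [J, PySem.Chars.join, List.intercalate]
    | cons x t =>
      rw [show J out (w :: x :: t) = J ((if out ≠ [] then out ++ [' '] else out) ++ pvFlush w) (x :: t) from rfl]
      rw [ih _ (fun v hv => hne v (by simp [hv]))]
      have hne2 : (if out ≠ [] then out ++ [' '] else out) ++ pvFlush w ≠ [] := by
        simp [hfw]
      rw [if_neg (show ¬(x :: t = []) from by simp), if_pos hne2,
          if_neg (show ¬(w :: x :: t = []) from by simp)]
      rw [show List.map pvFlush (w :: x :: t) = pvFlush w :: pvFlush x :: List.map pvFlush t from rfl,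
          PySem.Chars.join_cons_cons]
      simp [List.append_assoc]

-- the whole of Source B's loop, running from any state whose word has no space
lemma scan_loop : ∀ (cs out word : List Char), ' ' ∉ word →
    ((cs ++ [' ']).foldl pvStep (out, word)).1
      = J out ((mySplit (word ++ PySem.Chars.lower cs) ' ').filter (fun w => w ≠ [])) := by
  intro cs
  induction cs with
  | nil =>
    intro out word hw
    rw [mySplit_no_sep (by simpa [PySem.Chars.lower] using hw)]
    by_cases hword : word = []
    · subst hword
      simp [pvStep, J, PySem.Chars.lower, List.filter]
    · simp [pvStep, hword, J, PySem.Chars.lower, List.filter]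
  | cons c cs' ih =>
    intro out word hw
    by_cases hc : c = ' '
    · subst hc
      have hsplit : mySplit (word ++ ' ' :: PySem.Chars.lower cs') ' '
          = word :: mySplit (PySem.Chars.lower cs') ' ' := by
        rw [show word ++ ' ' :: PySem.Chars.lower cs' = word ++ [' '] ++ PySem.Chars.lower cs' by simp,
            List.append_assoc, mySplit_append _ hw]
        obtain ⟨h', t', ht⟩ := mySplit_cons_exists (PySem.Chars.lower cs') ' '
        simp [ht, mySplit]
      rw [show PySem.Chars.lower (' ' :: cs') = ' ' :: PySem.Chars.lower cs' from by
        simp [PySem.Chars.lower]; decide]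
      rw [hsplit]
      by_cases hword : word = []
      · subst hword
        rw [show ((' ' :: cs' ++ [' ']).foldl pvStep (out, [])) = ((cs' ++ [' ']).foldl pvStep (out, [])) from by
          simp [pvStep]]
        rw [ih out [] (by simp)]
        simp
      · rw [show ((' ' :: cs' ++ [' ']).foldl pvStep (out, word))
            = ((cs' ++ [' ']).foldl pvStep ((if out ≠ [] then out ++ [' '] else out) ++ pvFlush word, [])) from by
          simp [pvStep, hword]]
        rw [ih _ [] (by simp)]
        simp [List.filter, hword, J]
    · have hlc : PySem.Chars.lowerChar c ≠ ' ' := lowerChar_ne_space hc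
      have hw' : ' ' ∉ word ++ [PySem.Chars.lowerChar c] := by
        simp [hw]
        exact fun hh => hlc hh.symm
      rw [show ((c :: cs' ++ [' ']).foldl pvStep (out, word))
          = ((cs' ++ [' ']).foldl pvStep (out, word ++ [PySem.Chars.lowerChar c])) from by
        simp [pvStep, hc]]
      rw [ih out _ hw']
      rw [show PySem.Chars.lower (c :: cs') = PySem.Chars.lowerChar c :: PySem.Chars.lower cs' from by
        simp [PySem.Chars.lower]]
      simp

-- the core equality: A's fueled recursion = B's scan, on every list of characters
lemma namefy_core (cs : List Char) :
    namefyAux 2 cs = ((cs ++ [' ']).foldl pvStep ([], [])).1 := by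
  rw [scan_loop cs [] [] (by simp)]
  simp only [List.nil_append]
  by_cases hsp : ' ' ∈ cs
  · -- recursive branch of A
    rw [show namefyAux 2 cs = PySem.Chars.join [' ']
        (((PySem.Chars.splitOn cs [' ']).filter (fun w => w ≠ [])).map (namefyAux 1)) from by
      simp [namefyAux, hsp]]
    rw [splitOn_eq_mySplit]
    rw [mySplit_lower]
    have hfm : ((mySplit cs ' ').map PySem.Chars.lower).filter (fun w => w ≠ [])
        = ((mySplit cs ' ').filter (fun w => w ≠ [])).map PySem.Chars.lower := by
      rw [List.filter_map]
      congr 1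
      apply List.filter_congr
      intro w _
      simp [PySem.Chars.lower, Function.comp]
    rw [hfm]
    set F := (mySplit cs ' ').filter (fun w => w ≠ []) with hF
    have hAmap : F.map (namefyAux 1) = F.map (fun w => pvFlush (PySem.Chars.lower w)) := by
      apply List.map_congr_left
      intro w hwF
      have hmem : w ∈ mySplit cs ' ' := List.mem_of_mem_filter hwF
      exact namefyAux_word 0 (not_mem_of_mem_mySplit hmem)
    rw [hAmap]
    rw [J_join _ [] (by
      intro w hwm
      simp at hwm
      obtain ⟨v, hv, hveq⟩ := hwm
      have hvne : v ≠ [] := by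
        have := List.of_mem_filter hv
        simpa using this
      rw [← hveq]
      simp [PySem.Chars.lower, hvne])]
    by_cases hFnil : F = []
    · simp [hFnil, PySem.Chars.join, List.intercalate]
    · rw [if_neg (by simpa using hFnil)]
      simp [List.map_map, Function.comp_def]
  · -- base branch of A
    rw [namefyAux_word 1 hsp]
    have hnos : ' ' ∉ PySem.Chars.lower cs := by
      simp [PySem.Chars.lower]
      intro x hx hcon
      by_cases hxe : x = ' '
      · subst hxe; exact hsp hx
      · exact lowerChar_ne_space hxe hcon
    rw [mySplit_no_sep hnos]
    by_cases hnil : PySem.Chars.lower cs = []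
    · have hcs : cs = [] := by simpa [PySem.Chars.lower] using hnil
      subst hcs
      simp [PySem.Chars.lower, J, pvFlush, pvConn, pvCapScan] at *
    · simp [List.filter, hnil, J]

-- ===== VERDICT (by name: the statement is the Claim_ definition above) =====
theorem namefy_spec : Claim_equal_namefy := by
  intro nome _
  unfold Spec_namefy namefy namefy_alt
  exact congrArg String.mk (namefy_core nome.toList)
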